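-- pv_equiv track=rewrite | github.com/brasilicioh/Solucoes-OBI | solucoes/poligrama/poligrama.py | raiz_poligrama
-- ===== SOURCE A (Python) =====
-- def anagrama(palavra1: str, palavra2: str) -> bool:
--     return sorted(palavra1) == sorted(palavra2)
--
-- def raiz_poligrama(tamanho: int, palavra: str) -> str:
--     for tamRaiz in range(1, tamanho//2):
--         if tamanho % tamRaiz == 0:
--             raiz = palavra[:tamRaiz]
--             partesDaPalavra = [palavra[i:(i+tamRaiz)] for i in range(0, tamanho, tamRaiz)]
--
--             if all(anagrama(raiz, parte) for parte in partesDaPalavra):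
--                 return raiz
--
--     return "*"
-- ===== SOURCE B (Python) =====
-- def raiz_poligrama(tamanho: int, palavra: str) -> str:
--     # One forward pass builds a prefix count table over the word's (sorted, distinct)
--     # alphabet; each block's character counts are then read off by subtracting two
--     # prefix rows, instead of sorting every block.
--     alphabet = sorted(set(palavra))
--     k = len(alphabet)
--     L = len(palavra)
--     prefix = [[0] * k]
--     for ch in palavra:
--         last = prefix[-1]
--         prefix.append([last[j] + (1 if alphabet[j] == ch else 0) for j in range(k)])
--
--     def vec(a, b):
--         pa = prefix[min(a, L)]
--         pb = prefix[min(b, L)]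
--         return [x - y for x, y in zip(pb, pa)]
--
--     for tamRaiz in range(1, tamanho // 2):
--         if tamanho % tamRaiz == 0:
--             root = vec(0, tamRaiz)
--             if all(vec(i, i + tamRaiz) == root for i in range(0, tamanho, tamRaiz)):
--                 return palavra[:tamRaiz]
--     return "*"
-- ===== Notes on version B (the rewrite author's own statement) =====
-- stated objective: alternative
-- what changed: Instead of sorting the root and every block for each candidate divisor, B builds a prefix character-count table over the word's distinct alphabet in one forward pass and compares blocks by subtracting two prefix rows.
import Mathlib
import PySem

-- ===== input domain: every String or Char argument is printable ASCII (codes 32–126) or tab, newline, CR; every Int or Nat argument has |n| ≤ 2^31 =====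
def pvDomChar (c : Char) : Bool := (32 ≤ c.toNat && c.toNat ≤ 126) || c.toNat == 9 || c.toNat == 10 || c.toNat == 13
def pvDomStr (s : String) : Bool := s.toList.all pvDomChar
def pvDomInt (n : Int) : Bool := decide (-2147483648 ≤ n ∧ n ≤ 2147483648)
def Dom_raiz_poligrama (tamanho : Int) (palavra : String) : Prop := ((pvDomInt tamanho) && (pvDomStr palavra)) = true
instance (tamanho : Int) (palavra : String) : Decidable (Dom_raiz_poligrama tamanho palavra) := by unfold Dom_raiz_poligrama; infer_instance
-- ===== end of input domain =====

-- B replaces the per-block sorting of A by a prefix character-count table built in one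
-- forward pass and queried by row differences (alternative decomposition, same exact results).

-- ===== PORT A =====
-- anagrama(p1, p2) = (sorted(p1) == sorted(p2))
def pvAnagrama (p1 p2 : List Char) : Bool :=
  PySem.List.sorted p1 (fun x => x) false == PySem.List.sorted p2 (fun x => x) false

-- the `for tamRaiz in range(1, tamanho//2)` loop with its early return
def pvLoopA (tamanho : Int) (s : List Char) : List Int → String
  | [] => "*"
  | t :: rest =>
    if PySem.Int.mod tamanho t = 0 then
      let raiz := PySem.List.slice s none (some t)
      let partes := (PySem.List.pyRange 0 tamanho t).map
        (fun i => PySem.List.slice s (some i) (some (i + t)))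
      if partes.all (fun p => pvAnagrama raiz p) then String.ofList raiz
      else pvLoopA tamanho s rest
    else pvLoopA tamanho s rest

def raiz_poligrama (tamanho : Int) (palavra : String) : String :=
  pvLoopA tamanho palavra.toList
    (PySem.List.pyRange 1 (PySem.Int.floordiv tamanho 2) 1)

-- ===== PORT B =====
-- one step of the prefix-table build:
-- prefix.append([last[j] + (1 if alphabet[j] == ch else 0) for j in range(k)])
def pvStep (alphabet : List Char) (pf : List (List Int)) (ch : Char) : List (List Int) :=
  let last := PySem.List.pyGetD pf (-1) []
  pf ++ [(PySem.List.pyRange 0 (alphabet.length : Int) 1).map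
    (fun j => PySem.List.pyGetD last j 0 +
      (if PySem.List.pyGetD alphabet j ' ' == ch then 1 else 0))]

-- vec(a, b) = [x - y for x, y in zip(prefix[min(b,L)], prefix[min(a,L)])]
def pvVec (pfx : List (List Int)) (L : Int) (a b : Int) : List Int :=
  let pa := PySem.List.pyGetD pfx (min a L) []
  let pb := PySem.List.pyGetD pfx (min b L) []
  (pb.zip pa).map (fun xy => xy.1 - xy.2)

def pvLoopB (tamanho : Int) (s : List Char) (pfx : List (List Int)) (L : Int) :
    List Int → String
  | [] => "*"
  | t :: rest =>
    if PySem.Int.mod tamanho t = 0 then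
      let root := pvVec pfx L 0 t
      if (PySem.List.pyRange 0 tamanho t).all
          (fun i => pvVec pfx L i (i + t) == root) then
        String.ofList (PySem.List.slice s none (some t))
      else pvLoopB tamanho s pfx L rest
    else pvLoopB tamanho s pfx L rest

def raiz_poligrama_alt (tamanho : Int) (palavra : String) : String :=
  let s := palavra.toList
  let alphabet := PySem.List.sorted (PySem.Set.ofList s) (fun x => x) false
  let pfx := s.foldl (pvStep alphabet) [List.replicate alphabet.length 0]
  pvLoopB tamanho s pfx (s.length : Int)
    (PySem.List.pyRange 1 (PySem.Int.floordiv tamanho 2) 1)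

-- ===== PRECONDITION & SPEC =====
def Spec_raiz_poligrama (tamanho : Int) (palavra : String) (out : String) : Prop := out = raiz_poligrama_alt tamanho palavra
instance (tamanho : Int) (palavra : String) (out : String) : Decidable (Spec_raiz_poligrama tamanho palavra out) := by unfold Spec_raiz_poligrama; infer_instance

-- ===== CLAIM (what is proved, stated in full; the proofs are below) =====
def Claim_equal_raiz_poligrama : Prop := ∀ (tamanho : Int) (palavra : String), Dom_raiz_poligrama tamanho palavra → Spec_raiz_poligrama tamanho palavra (raiz_poligrama tamanho palavra)

-- ===== LEMMAS AND PROOFS =====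
-- the count row of an already-processed prefix u of the word
def pvRow (alphabet : List Char) (u : List Char) : List Int :=
  alphabet.map (fun c => (u.count c : Int))

lemma pyGetD_neg_one {α : Type} (l : List α) (d : α) (h : l ≠ []) :
    PySem.List.pyGetD l (-1) d = l.getLast h := by
  have hl : 1 ≤ l.length := List.length_pos_iff.mpr h
  simp [PySem.List.pyGetD, PySem.List.pyGet?, PySem.List.pyIdx?, hl, List.getLast_eq_getElem,
    List.getElem?_eq_getElem (show l.length - 1 < l.length by omega)]

lemma pvStep_table (alphabet : List Char) (u : List Char) (ch : Char) :
    pvStep alphabet ((u.inits).map (pvRow alphabet)) ch =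
      ((u ++ [ch]).inits).map (pvRow alphabet) := by
  have hne : (u.inits).map (pvRow alphabet) ≠ [] := by
    induction u with
    | nil => simp
    | cons a t ih => simp [List.inits]
  have hlast : ((u.inits).map (pvRow alphabet)).getLast hne = pvRow alphabet u := by
    rw [List.getLast_eq_getElem]
    simp [List.getElem_inits]
  have hrow : (PySem.List.pyRange 0 (alphabet.length : Int) 1).map
      (fun j => PySem.List.pyGetD (pvRow alphabet u) j 0 +
        (if PySem.List.pyGetD alphabet j ' ' == ch then 1 else 0)) =
      pvRow alphabet (u ++ [ch]) := by
    rw [show ((alphabet.length : Int)) = ((alphabet.length : Nat) : Int) from rfl,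
        PySem.List.pyRange_zero_nat, List.map_map]
    apply List.ext_getElem
    · simp [pvRow]
    · intro j h1 h2
      simp only [List.getElem_map, List.getElem_range, Function.comp,
        PySem.List.pyGetD_natCast, pvRow]
      have hj : j < alphabet.length := by simpa [pvRow] using h2
      simp [List.getD_eq_getElem?_getD, List.getElem?_eq_getElem hj,
        List.getElem?_eq_getElem (show j < (alphabet.map (fun c => ((u.count c : Int)))).length by simpa using hj),
        List.count_append]
      rcases eq_or_ne alphabet[j] ch with he | he
      · simp [he]
      · simp [he, Ne.symm he]
  rw [pvStep]
  simp only [pyGetD_neg_one _ _ hne, hlast, hrow, List.inits_append]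
  simp [pvRow]

lemma pvBuild_aux (alphabet : List Char) :
    ∀ (s u : List Char), s.foldl (pvStep alphabet) ((u.inits).map (pvRow alphabet)) =
      ((u ++ s).inits).map (pvRow alphabet)
  | [], u => by simp
  | ch :: s', u => by
    rw [List.foldl_cons, pvStep_table, pvBuild_aux alphabet s' (u ++ [ch])]
    simp

lemma pvBuild_table (alphabet : List Char) (s : List Char) :
    s.foldl (pvStep alphabet) [List.replicate alphabet.length 0] =
      (s.inits).map (pvRow alphabet) := by
  have h0 : ([] : List Char).inits.map (pvRow alphabet) = [List.replicate alphabet.length 0] := by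
    simp [pvRow, List.map_const']
  rw [← h0, pvBuild_aux alphabet s []]
  simp

lemma pvTable_get (alphabet : List Char) (s : List Char) (a : Int) (ha : 0 ≤ a) :
    PySem.List.pyGetD ((s.inits).map (pvRow alphabet)) (min a (s.length : Int)) [] =
      pvRow alphabet (s.take a.toNat) := by
  have hmin : min a (s.length : Int) = ((min a.toNat s.length : Nat) : Int) := by omega
  have hlt : min a.toNat s.length < ((s.inits).map (pvRow alphabet)).length := by
    simp [List.length_inits]
  rw [hmin, PySem.List.pyGetD_natCast, List.getD_eq_getElem?_getD,
    List.getElem?_eq_getElem hlt]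
  simp only [List.getElem_map, List.getElem_inits, Option.getD_some]
  rcases Nat.le_total a.toNat s.length with h | h
  · rw [min_eq_left h]
  · rw [min_eq_right h, List.take_of_length_le h, List.take_of_length_le (le_refl _)]

lemma pvMapSubZip {α : Type} (l : List α) (f g : α → Int) :
    ((l.map f).zip (l.map g)).map (fun xy => xy.1 - xy.2) = l.map (fun x => f x - g x) := by
  induction l with
  | nil => simp
  | cons x t ih => simp [ih]

lemma pvCount_sub (s : List Char) (c : Char) (a b : Nat) (h : a ≤ b) :
    ((s.take b).count c : Int) - ((s.take a).count c : Int) =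
      (((s.drop a).take (b - a)).count c : Int) := by
  have hsplit : s.take b = s.take a ++ (s.drop a).take (b - a) := by
    rw [← List.take_add]
    congr 1
    omega
  rw [hsplit, List.count_append]
  push_cast
  ring

lemma pvVec_spec (alphabet : List Char) (s : List Char) (a b : Int)
    (ha : 0 ≤ a) (hab : a ≤ b) :
    pvVec ((s.inits).map (pvRow alphabet)) (s.length : Int) a b =
      alphabet.map (fun c => ((PySem.List.slice s (some a) (some b)).count c : Int)) := by
  rw [pvVec, pvTable_get alphabet s a ha, pvTable_get alphabet s b (le_trans ha hab),
    PySem.List.slice_toNat s ha (le_trans ha hab)]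
  simp only [pvRow, pvMapSubZip]
  exact List.map_congr_left fun c _ =>
    pvCount_sub s c a.toNat b.toNat (by omega)

lemma pvVecEq_iff_perm (s P Q : List Char) (hP : ∀ x ∈ P, x ∈ s) (hQ : ∀ x ∈ Q, x ∈ s) :
    ((PySem.List.sorted (PySem.Set.ofList s) (fun x => x) false).map (fun c => (P.count c : Int)) =
     (PySem.List.sorted (PySem.Set.ofList s) (fun x => x) false).map (fun c => (Q.count c : Int)))
      ↔ P.Perm Q := by
  rw [List.map_eq_map_iff, List.perm_iff_count]
  constructor
  · intro h c
    by_cases hc : c ∈ s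
    · have hmem : c ∈ PySem.List.sorted (PySem.Set.ofList s) (fun x => x) false := by
        rw [PySem.List.mem_sorted, PySem.Set.mem_ofList]; exact hc
      exact Nat.cast_injective (h c hmem)
    · rw [List.count_eq_zero.mpr (fun hm => hc (hP c hm)),
        List.count_eq_zero.mpr (fun hm => hc (hQ c hm))]
  · intro h c _
    rw [h c]

lemma pvAnagrama_eq_vecEq (s : List Char) (t i : Int) (ht : 1 ≤ t) (hi : 0 ≤ i) :
    pvAnagrama (PySem.List.slice s none (some t)) (PySem.List.slice s (some i) (some (i + t)))
      = (pvVec ((s.inits).map (pvRow (PySem.List.sorted (PySem.Set.ofList s) (fun x => x) false)))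
          (s.length : Int) i (i + t) ==
         pvVec ((s.inits).map (pvRow (PySem.List.sorted (PySem.Set.ofList s) (fun x => x) false)))
          (s.length : Int) 0 t) := by
  set alphabet := PySem.List.sorted (PySem.Set.ofList s) (fun x => x) false with halpha
  have hraiz : PySem.List.slice s none (some t) = PySem.List.slice s (some 0) (some t) := by
    simp
  rw [hraiz, pvAnagrama,
    pvVec_spec alphabet s i (i + t) hi (by omega),
    pvVec_spec alphabet s 0 t (le_refl 0) (by omega)]
  rw [Bool.eq_iff_iff, beq_iff_eq, beq_iff_eq,
    PySem.List.sorted_id_eq_sorted_id_iff_perm,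
    pvVecEq_iff_perm s _ _ (fun x hx => PySem.List.mem_of_mem_slice _ _ _ hx)
      (fun x hx => PySem.List.mem_of_mem_slice _ _ _ hx)]
  exact ⟨List.Perm.symm, List.Perm.symm⟩

lemma pvAll_congr {α : Type} (l : List α) (f g : α → Bool) (h : ∀ x ∈ l, f x = g x) :
    l.all f = l.all g := by
  induction l with
  | nil => rfl
  | cons x tl ih => simp_all

lemma pvLoop_eq (tamanho : Int) (s : List Char) (xs : List Int)
    (hxs : ∀ t ∈ xs, 1 ≤ t) :
    pvLoopA tamanho s xs =
      pvLoopB tamanho s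
        ((s.inits).map (pvRow (PySem.List.sorted (PySem.Set.ofList s) (fun x => x) false)))
        (s.length : Int) xs := by
  induction xs with
  | nil => rfl
  | cons t rest ih =>
    have ht : 1 ≤ t := hxs t (List.mem_cons_self ..)
    have ih' := ih (fun u hu => hxs u (List.mem_cons_of_mem _ hu))
    simp only [pvLoopA, pvLoopB]
    split
    · have hall : ((PySem.List.pyRange 0 tamanho t).map
          (fun i => PySem.List.slice s (some i) (some (i + t)))).all
            (fun p => pvAnagrama (PySem.List.slice s none (some t)) p) =
          (PySem.List.pyRange 0 tamanho t).all
            (fun i => pvVec ((s.inits).map (pvRow (PySem.List.sorted (PySem.Set.ofList s) (fun x => x) false)))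
              (s.length : Int) i (i + t) ==
              pvVec ((s.inits).map (pvRow (PySem.List.sorted (PySem.Set.ofList s) (fun x => x) false)))
              (s.length : Int) 0 t) := by
        rw [List.all_map]
        refine pvAll_congr _ _ _ fun i hi => ?_
        have hi0 : 0 ≤ i := ((PySem.List.mem_pyRange_iff_of_pos (by omega) i).mp hi).1
        exact pvAnagrama_eq_vecEq s t i ht hi0
      rw [hall]
      split
      · rfl
      · exact ih'
    · exact ih'

-- ===== VERDICT (by name: the statement is the Claim_ definition above) =====
theorem raiz_poligrama_spec : Claim_equal_raiz_poligrama := by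
  intro tamanho palavra _
  unfold Spec_raiz_poligrama raiz_poligrama raiz_poligrama_alt
  simp only []
  rw [pvBuild_table]
  exact pvLoop_eq tamanho palavra.toList _
    (fun t ht => (PySem.List.mem_pyRange_one.mp ht).1)
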